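-- pv_equiv track=rewrite | github.com/ejaj/Data-Structures | BigO/fun.py | fun_challenge
-- ===== SOURCE A (Python) =====
-- def another_function():
--     pass
--
-- def fun_challenge(arr):
--     """
--
--     :param arr:
--     :return:
--     """
--     a = 10  # O(1)
--     a = 50 + 3  # O(1)
--     for i in range(len(arr)):  # O(n)
--         another_function()  # O(n)
--         st = True  # O(n)
--         a += 1  # O(n)
--     return a  # 0(1)
-- ===== SOURCE B (Python) =====
-- def fun_challenge(arr):
--     return 53 + len(arr)
-- ===== Notes on version B (the rewrite author's own statement) =====
-- stated objective: simpler
-- what changed: Replaces the per-element counting loop (and dead calls/assignments) with the closed form 53 + len(arr).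
import Mathlib
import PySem

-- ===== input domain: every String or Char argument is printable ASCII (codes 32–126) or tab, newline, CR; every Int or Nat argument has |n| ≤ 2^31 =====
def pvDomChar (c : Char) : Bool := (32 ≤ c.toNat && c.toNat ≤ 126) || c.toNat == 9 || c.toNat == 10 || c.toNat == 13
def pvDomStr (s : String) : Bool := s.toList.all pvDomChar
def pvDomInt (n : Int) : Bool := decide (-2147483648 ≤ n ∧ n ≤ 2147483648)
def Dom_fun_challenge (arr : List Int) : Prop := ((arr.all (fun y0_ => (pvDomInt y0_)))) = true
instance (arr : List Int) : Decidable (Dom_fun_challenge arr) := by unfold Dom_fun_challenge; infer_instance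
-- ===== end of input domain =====

-- ===== PORT A =====
-- Header: B replaces the counting loop with the closed form 53 + len(arr) (simpler, O(1)).
-- literal port of A: a = 53, then one loop iteration per index incrementing a
def fun_challenge (arr : List Int) : Int :=
  let a : Int := 10
  let a : Int := 50 + 3
  (PySem.List.pyRange 0 (arr.length : Int) 1).foldl (fun a _ => a + 1) a

-- ===== PORT B =====
def fun_challenge_alt (arr : List Int) : Int := 53 + (arr.length : Int)

-- ===== PRECONDITION & SPEC =====
def Spec_fun_challenge (arr : List Int) (out : Int) : Prop := out = fun_challenge_alt arr
instance (arr : List Int) (out : Int) : Decidable (Spec_fun_challenge arr out) := by unfold Spec_fun_challenge; infer_instance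

-- ===== CLAIM (what is proved, stated in full; the proofs are below) =====
def Claim_equal_fun_challenge : Prop := ∀ (arr : List Int), Dom_fun_challenge arr → Spec_fun_challenge arr (fun_challenge arr)

-- ===== LEMMAS AND PROOFS =====

-- ===== VERDICT (by name: the statement is the Claim_ definition above) =====
lemma foldl_add_one (l : List Int) (a : Int) : l.foldl (fun a _ => a + 1) a = a + l.length := by
  induction l generalizing a with
  | nil => simp
  | cons x xs ih => simp [List.foldl, ih]; omega

theorem fun_challenge_spec : Claim_equal_fun_challenge := by
  intro arr _
  unfold Spec_fun_challenge fun_challenge fun_challenge_alt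
  rw [foldl_add_one, PySem.List.length_pyRange_one]
  omega
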